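-- pv_equiv track=rewrite | github.com/jiminchur/BaekjoonCodingTest | 프로그래머스/0/120956. 옹알이 （1）/옹알이 （1）.py | solution
-- ===== SOURCE A (Python) =====
-- from itertools import permutations
--
-- def solution(babbling):
--     babbling_lst = ["aya", "ye", "woo", "ma"]
--     count = 0
--     all_babbling_lst = []
--     for length in range(1,5):
--         for permu in permutations(babbling_lst,length):
--             all_babbling_lst.append("".join(permu))
--
--     for speak in babbling:
--         if speak in all_babbling_lst:
--             count += 1
--     answer = count
--     return answer
-- ===== SOURCE B (Python) =====
-- def _parses(s):
--     used = []
--     i = 0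
--     n = len(s)
--     while i < n:
--         for t in ("aya", "ye", "woo", "ma"):
--             if s.startswith(t, i):
--                 if t in used:
--                     return False
--                 used.append(t)
--                 i += len(t)
--                 break
--         else:
--             return False
--     return True
--
-- def solution(babbling):
--     return sum(1 for s in babbling if s and _parses(s))
-- ===== Notes on version B (the rewrite author's own statement) =====
-- stated objective: simpler
-- what changed: B drops A's precomputed list of all 64 token-permutation concatenations and instead greedily parses each word left-to-right with a position index and a used-token set (the four tokens have distinct first characters, so parsing is deterministic), counting words that parse completely without reuse.
import Mathlib
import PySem

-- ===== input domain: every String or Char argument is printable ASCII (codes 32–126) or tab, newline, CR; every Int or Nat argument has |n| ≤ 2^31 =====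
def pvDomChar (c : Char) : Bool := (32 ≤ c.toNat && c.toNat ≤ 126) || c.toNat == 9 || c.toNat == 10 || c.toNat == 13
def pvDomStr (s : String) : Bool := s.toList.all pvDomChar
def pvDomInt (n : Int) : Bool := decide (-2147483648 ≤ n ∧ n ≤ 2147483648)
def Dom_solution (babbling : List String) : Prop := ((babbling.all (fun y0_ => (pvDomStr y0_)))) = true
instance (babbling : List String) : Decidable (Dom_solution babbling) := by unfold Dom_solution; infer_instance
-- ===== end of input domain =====

-- B replaces A's precomputed list of all 64 token permutations by a direct left-to-right
-- greedy parse of each word with a used-token set (objective: simpler, no permutation table).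

-- ===== PORT A =====
-- itertools.permutations(xs, r): pick each element in index order, then permutations of the rest
def pvSelections : List String → List (String × List String)
  | [] => []
  | x :: xs => (x, xs) :: (pvSelections xs).map (fun p => (p.1, x :: p.2))

def pvPermsA : List String → Nat → List (List String)
  | _, 0 => [[]]
  | xs, n + 1 => (pvSelections xs).flatMap (fun p => (pvPermsA p.2 n).map (p.1 :: ·))

-- "".join(permu)
def pvJoinA (ts : List String) : String := ts.foldl (· ++ ·) ""

-- the two nested for-loops building all_babbling_lst (range(1,5) ported via PySem.List.pyRange)
def pvAllBabbling : List String :=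
  (PySem.List.pyRange 1 5 1).foldl
    (fun acc len => acc ++ (pvPermsA ["aya", "ye", "woo", "ma"] len.toNat).map pvJoinA) []

def solution (babbling : List String) : Int :=
  babbling.foldl (fun count speak => if speak ∈ pvAllBabbling then count + 1 else count) 0

-- ===== PORT B =====
-- greedy parse: the four tokens start with distinct characters, matched here by pattern
-- (s.startswith(t, i) for t in ("aya","ye","woo","ma")); `used` is the used-token list
def pvParse : List Char → List String → Bool
  | [], _ => true
  | 'a' :: 'y' :: 'a' :: rest, used =>
      if "aya" ∈ used then false else pvParse rest (used ++ ["aya"])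
  | 'y' :: 'e' :: rest, used =>
      if "ye" ∈ used then false else pvParse rest (used ++ ["ye"])
  | 'w' :: 'o' :: 'o' :: rest, used =>
      if "woo" ∈ used then false else pvParse rest (used ++ ["woo"])
  | 'm' :: 'a' :: rest, used =>
      if "ma" ∈ used then false else pvParse rest (used ++ ["ma"])
  | _, _ => false

-- sum(1 for s in babbling if s and _parses(s))
def solution_alt (babbling : List String) : Int :=
  babbling.foldl (fun count s => if s ≠ "" ∧ pvParse s.toList [] = true then count + 1 else count) 0

-- ===== PRECONDITION & SPEC =====
def Spec_solution (babbling : List String) (out : Int) : Prop := out = solution_alt babbling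
instance (babbling : List String) (out : Int) : Decidable (Spec_solution babbling out) := by unfold Spec_solution; infer_instance

-- ===== CLAIM (what is proved, stated in full; the proofs are below) =====
def Claim_equal_solution : Prop := ∀ (babbling : List String), Dom_solution babbling → Spec_solution babbling (solution babbling)

-- ===== LEMMAS AND PROOFS =====

def pvToks : List String := ["aya", "ye", "woo", "ma"]

-- all nonempty-or-empty permutations of sublists of the token list (proof-side helper)
def pvPerms : List (List String) := pvToks.sublists.flatMap List.permutations'

theorem pvMemPerms (ts : List String) (hn : ts.Nodup) (hs : ∀ t ∈ ts, t ∈ pvToks) :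
    ts ∈ pvPerms := by
  obtain ⟨l, hperm, hsub⟩ := List.Nodup.subperm hn hs
  simp only [pvPerms, List.mem_flatMap, List.mem_sublists, List.mem_permutations']
  exact ⟨l, hsub, hperm.symm⟩

theorem pvPermsJoinMem : ∀ ts ∈ pvPerms, ts ≠ [] → pvJoinA ts ∈ pvAllBabbling := by decide

theorem pvAllParse : ∀ s ∈ pvAllBabbling, s ≠ "" ∧ pvParse s.toList [] = true := by decide

theorem pvJoinA_toList (ts : List String) :
    (pvJoinA ts).toList = (ts.map String.toList).flatten := by
  suffices h : ∀ (ts : List String) (acc : String),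
      (ts.foldl (· ++ ·) acc).toList = acc.toList ++ (ts.map String.toList).flatten by
    simpa using h ts ""
  intro ts
  induction ts with
  | nil => simp
  | cons t ts ih => intro acc; simp [List.foldl_cons, ih, String.toList_append]

theorem pvStep {tok : String} {used : List String} {cs : List Char} {ts : List String}
    (hcs : cs = tok.toList ++ (ts.map String.toList).flatten)
    (htok : tok ∈ pvToks) (hmem : tok ∉ used)
    (hnd : ts.Nodup) (htk : ∀ t ∈ ts, t ∈ pvToks) (hus : ∀ t ∈ ts, t ∉ used ++ [tok]) :
    ∃ ts' : List String, cs = (ts'.map String.toList).flatten ∧ ts'.Nodup ∧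
      (∀ t ∈ ts', t ∈ pvToks) ∧ (∀ t ∈ ts', t ∉ used) := by
  refine ⟨tok :: ts, by simp [hcs], ?_, ?_, ?_⟩
  · exact List.nodup_cons.mpr ⟨fun hm => (hus _ hm) (by simp), hnd⟩
  · intro t ht
    rcases List.mem_cons.mp ht with h' | h'
    · exact h' ▸ htok
    · exact htk t h'
  · intro t ht
    rcases List.mem_cons.mp ht with h' | h'
    · exact h' ▸ hmem
    · exact fun hu => (hus t h') (by simp [hu])

theorem pvParse_sound : ∀ (cs : List Char) (used : List String), pvParse cs used = true →
    ∃ ts : List String, cs = (ts.map String.toList).flatten ∧ ts.Nodup ∧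
      (∀ t ∈ ts, t ∈ pvToks) ∧ (∀ t ∈ ts, t ∉ used) := by
  intro cs used
  fun_induction pvParse cs used with
  | case1 => exact fun _ => ⟨[], by simp⟩
  | case2 => exact fun h => by simp at h
  | case4 => exact fun h => by simp at h
  | case6 => exact fun h => by simp at h
  | case8 => exact fun h => by simp at h
  | case10 => exact fun h => by simp at h
  | case3 rest used hmem ih =>
      intro h
      obtain ⟨ts, hflat, hnd, htk, hus⟩ := ih h
      exact pvStep (by subst hflat; rfl) (by simp [pvToks]) hmem hnd htk hus
  | case5 rest used hmem ih =>
      intro h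
      obtain ⟨ts, hflat, hnd, htk, hus⟩ := ih h
      exact pvStep (by subst hflat; rfl) (by simp [pvToks]) hmem hnd htk hus
  | case7 rest used hmem ih =>
      intro h
      obtain ⟨ts, hflat, hnd, htk, hus⟩ := ih h
      exact pvStep (by subst hflat; rfl) (by simp [pvToks]) hmem hnd htk hus
  | case9 rest used hmem ih =>
      intro h
      obtain ⟨ts, hflat, hnd, htk, hus⟩ := ih h
      exact pvStep (by subst hflat; rfl) (by simp [pvToks]) hmem hnd htk hus

theorem pvMemIff (s : String) :
    s ∈ pvAllBabbling ↔ (s ≠ "" ∧ pvParse s.toList [] = true) := by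
  constructor
  · exact fun h => pvAllParse s h
  · rintro ⟨hne, hp⟩
    obtain ⟨ts, hflat, hnd, htk, -⟩ := pvParse_sound _ _ hp
    have hts : ts ≠ [] := by
      rintro rfl
      exact hne (String.toList_eq_nil_iff.mp (by simpa using hflat))
    have hmem := pvPermsJoinMem ts (pvMemPerms ts hnd htk) hts
    have : s = pvJoinA ts := String.toList_inj.mp (by rw [pvJoinA_toList, hflat])
    rwa [this]

theorem pvCount (l : List String) (c : Int) :
    l.foldl (fun count speak => if speak ∈ pvAllBabbling then count + 1 else count) c =
    l.foldl (fun count s => if s ≠ "" ∧ pvParse s.toList [] = true then count + 1 else count) c := by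
  induction l generalizing c with
  | nil => rfl
  | cons s l ih =>
      simp only [List.foldl_cons]
      rw [if_congr (pvMemIff s) rfl rfl, ih]

-- ===== VERDICT (by name: the statement is the Claim_ definition above) =====
theorem solution_spec : Claim_equal_solution := by
  intro babbling _
  unfold Spec_solution solution solution_alt
  exact pvCount babbling 0
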